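-- pv_equiv track=rewrite | github.com/ng196/DSA-BASICS | 3_03_25_p1.py | isGoodorBad
-- ===== SOURCE A (Python) =====
-- def isGoodorBad(S):
--     v = "aeiou"
--     vowel = 0
--     conso = 0
--     for i in S :
--         if i in v :
--             conso =0
--             vowel+=1
--
--
--
--         elif i == '?':
--             conso += 1
--             vowel += 1
--
--
--
--         elif i not in v :
--             vowel = 0
--             conso+=1
--
--
--         if vowel>5 or conso > 3 :
--             return 0
--
--     return 1
-- ===== SOURCE B (Python) =====
-- def isGoodorBad(S):
--     n = len(S)
--     if any(all(c in 'aeiou?' for c in S[i:i+6]) for i in range(n - 5)):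
--         return 0
--     if any(all(c not in 'aeiou' for c in S[i:i+4]) for i in range(n - 3)):
--         return 0
--     return 1
-- ===== Notes on version B (the rewrite author's own statement) =====
-- stated objective: idiomatic
-- what changed: Replaced the stateful per-character vowel/consonant counters and early return by two stateless sliding-window existence checks: a run of 6 chars in [aeiou?] or of 4 chars outside aeiou anywhere in S.
import Mathlib
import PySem

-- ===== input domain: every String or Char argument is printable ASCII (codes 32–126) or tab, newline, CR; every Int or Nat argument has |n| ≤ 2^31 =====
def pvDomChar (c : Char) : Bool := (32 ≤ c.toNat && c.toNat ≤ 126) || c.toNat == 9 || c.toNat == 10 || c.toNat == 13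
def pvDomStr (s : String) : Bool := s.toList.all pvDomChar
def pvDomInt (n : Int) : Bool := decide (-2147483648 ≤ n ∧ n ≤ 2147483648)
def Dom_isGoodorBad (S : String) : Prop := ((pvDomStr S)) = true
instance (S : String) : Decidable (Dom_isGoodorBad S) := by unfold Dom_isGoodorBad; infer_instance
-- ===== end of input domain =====

set_option maxHeartbeats 1000000


-- B replaces A's stateful run counters with two stateless sliding-window existence checks (idiomatic, same cost).

-- ===== PORT A =====
-- literal port of A's loop: counters vowel/conso, early return 0, final return 1
def isGoodorBadGo : List Char → Int → Int → Int
  | [], _, _ => 1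
  | i :: rest, vowel, conso =>
    let st : Int × Int :=
      if "aeiou".toList.contains i then (vowel + 1, 0)
      else if i = '?' then (vowel + 1, conso + 1)
      else if !("aeiou".toList.contains i) then (0, conso + 1)
      else (vowel, conso)
    if st.1 > 5 ∨ st.2 > 3 then 0
    else isGoodorBadGo rest st.1 st.2

def isGoodorBad (S : String) : Int := isGoodorBadGo S.toList 0 0

-- ===== PORT B =====
-- literal port of Source B: two any-over-window checks, no loop state
def isGoodorBad_alt (S : String) : Int :=
  let l := S.toList
  if (List.range (l.length - 5)).any (fun i => ((l.drop i).take 6).all (fun c => "aeiou?".toList.contains c)) then 0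
  else if (List.range (l.length - 3)).any (fun i => ((l.drop i).take 4).all (fun c => !("aeiou".toList.contains c))) then 0
  else 1

-- ===== PRECONDITION & SPEC =====
def Spec_isGoodorBad (S : String) (out : Int) : Prop := out = isGoodorBad_alt S
instance (S : String) (out : Int) : Decidable (Spec_isGoodorBad S out) := by unfold Spec_isGoodorBad; infer_instance

-- ===== CLAIM (what is proved, stated in full; the proofs are below) =====
def Claim_equal_isGoodorBad : Prop := ∀ (S : String), Dom_isGoodorBad S → Spec_isGoodorBad S (isGoodorBad S)

-- ===== LEMMAS AND PROOFS =====

def vowQ (c : Char) : Bool := "aeiou?".toList.contains c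
def nonV (c : Char) : Bool := !("aeiou".toList.contains c)

-- window of length k at the front matches p
def frontMatch (p : Char → Bool) (k : Nat) (l : List Char) : Bool :=
  decide (k ≤ l.length) && (l.take k).all p

-- a window of length k matching p exists anywhere
def searchRun (p : Char → Bool) (k : Nat) : List Char → Bool
  | [] => false
  | i :: rest => frontMatch p k (i :: rest) || searchRun p k rest

-- A's loop as a Bool with Nat counters
def chk : List Char → Nat → Nat → Bool
  | [], _, _ => false
  | i :: rest, n, m =>
    let st : Nat × Nat :=
      if "aeiou".toList.contains i then (n + 1, 0)
      else if i = '?' then (n + 1, m + 1)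
      else if !("aeiou".toList.contains i) then (0, m + 1)
      else (n, m)
    (decide (st.1 > 5) || decide (st.2 > 3)) || chk rest st.1 st.2

lemma frontMatch_cons (p : Char → Bool) (k : Nat) (i : Char) (l : List Char) :
    frontMatch p (k + 1) (i :: l) = (p i && frontMatch p k l) := by
  simp [frontMatch, Bool.and_left_comm]

lemma frontMatch_nil (p : Char → Bool) (k : Nat) (hk : 1 ≤ k) : frontMatch p k [] = false := by
  simp [frontMatch]; omega

lemma frontMatch_zero (p : Char → Bool) (l : List Char) : frontMatch p 0 l = true := by
  simp [frontMatch]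

lemma frontMatch_mono {p : Char → Bool} {k k' : Nat} {l : List Char} (h : k ≤ k')
    (h' : frontMatch p k' l = true) : frontMatch p k l = true := by
  simp only [frontMatch, Bool.and_eq_true, decide_eq_true_eq, List.all_eq_true] at h' ⊢
  obtain ⟨h1, h2⟩ := h'
  refine ⟨by omega, fun x hx => h2 x ?_⟩
  have ht : l.take k = (l.take k').take k := by rw [List.take_take, min_eq_left h]
  exact List.mem_of_mem_take (by rwa [ht] at hx)

lemma searchRun_eq (p : Char → Bool) (k : Nat) (hk : 1 ≤ k) (l : List Char) :
    searchRun p k l = (frontMatch p k l || searchRun p k l.tail) := by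
  cases l <;> simp [searchRun, frontMatch_nil _ _ hk]

lemma goA_eq_chk : ∀ (l : List Char) (n m : Nat),
    isGoodorBadGo l (n : Int) (m : Int) = if chk l n m then 0 else 1 := by
  intro l
  induction l with
  | nil => intro n m; simp [isGoodorBadGo, chk]
  | cons i rest ih =>
    intro n m
    by_cases hv : "aeiou".toList.contains i = true
    · simp only [isGoodorBadGo, chk, hv, if_true]
      by_cases h : n + 1 > 5
      · rw [if_pos (Or.inl (by omega))]
        simp [h]
      · have h0 := ih (n + 1) 0
        rw [Nat.cast_zero] at h0
        have hcnd : ¬((n : Int) + 1 > 5 ∨ (0 : Int) > 3) := by omega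
        rw [if_neg hcnd,
          show (n : Int) + 1 = ((n + 1 : Nat) : Int) by push_cast; ring, h0]
        simp [h]
    · by_cases hq : i = '?'
      · subst hq
        have hcq : "aeiou".toList.contains '?' = false := by decide
        simp only [isGoodorBadGo, chk, hcq, Bool.false_eq_true, if_false, if_true]
        by_cases h5 : n + 1 > 5
        · rw [if_pos (Or.inl (by omega))]
          simp [h5]
        · by_cases h3 : m + 1 > 3
          · rw [if_pos (Or.inr (by omega))]
            simp [h3]
          · have h0 := ih (n + 1) (m + 1)
            have hcnd : ¬((n : Int) + 1 > 5 ∨ (m : Int) + 1 > 3) := by omega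
            rw [if_neg hcnd,
              show (n : Int) + 1 = ((n + 1 : Nat) : Int) by push_cast; ring,
              show (m : Int) + 1 = ((m + 1 : Nat) : Int) by push_cast; ring, h0]
            simp [h5, h3]
      · have hv' : "aeiou".toList.contains i = false := by simpa using hv
        simp only [isGoodorBadGo, chk, hv', Bool.false_eq_true, if_false, if_neg hq,
          Bool.not_false, if_true]
        by_cases h3 : m + 1 > 3
        · rw [if_pos (Or.inr (by omega))]
          simp [h3]
        · have h0 := ih 0 (m + 1)
          rw [Nat.cast_zero] at h0
          have hcnd : ¬((0 : Int) > 5 ∨ (m : Int) + 1 > 3) := by omega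
          rw [if_neg hcnd,
            show (m : Int) + 1 = ((m + 1 : Nat) : Int) by push_cast; ring, h0]
          simp [h3]

lemma chk_iff : ∀ (l : List Char) (n m : Nat), n ≤ 5 → m ≤ 3 →
    (chk l n m = true ↔
      (frontMatch vowQ (6 - n) l = true ∨ frontMatch nonV (4 - m) l = true ∨
       searchRun vowQ 6 l.tail = true ∨ searchRun nonV 4 l.tail = true)) := by
  intro l
  induction l with
  | nil =>
    intro n m hn hm
    simp [chk, searchRun, frontMatch_nil vowQ (6 - n) (by omega),
      frontMatch_nil nonV (4 - m) (by omega)]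
  | cons i rest ih =>
    intro n m hn hm
    by_cases hv : "aeiou".toList.contains i = true
    · have hv' : i = 'a' ∨ i = 'e' ∨ i = 'i' ∨ i = 'o' ∨ i = 'u' := by simpa using hv
      have hvq : vowQ i = true := by rcases hv' with h | h | h | h | h <;> simp [vowQ, h]
      have hnv : nonV i = false := by simp only [nonV, hv, Bool.not_true]
      have h6 : 6 - n = (5 - n) + 1 := by omega
      have h4 : 4 - m = (3 - m) + 1 := by omega
      rw [h6, h4]
      simp only [chk, hv, if_true, frontMatch_cons, hvq, hnv, Bool.true_and, Bool.false_and,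
        Bool.false_eq_true, List.tail_cons]
      by_cases h : n + 1 > 5
      · have h5 : 5 - n = 0 := by omega
        simp [h, h5, frontMatch_zero]
      · have habs : frontMatch vowQ 6 rest = true → frontMatch vowQ (5 - n) rest = true :=
          frontMatch_mono (by omega)
        have h65 : 6 - (n + 1) = 5 - n := by omega
        have hih := ih (n + 1) 0 (by omega) (by omega)
        rw [h65] at hih
        rw [searchRun_eq vowQ 6 (by omega) rest, searchRun_eq nonV 4 (by omega) rest]
        have hn5 : ¬ ((5 : Nat) < n + 1) := by omega
        simp only [Bool.or_eq_true, decide_eq_true_eq, hih, gt_iff_lt, Nat.sub_zero]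
        constructor
        · rintro ((h' | h') | h' | h' | h' | h')
          · exact absurd h' hn5
          · exact absurd h' (by omega)
          · exact Or.inl h'
          · exact Or.inr (Or.inr (Or.inr (Or.inl h')))
          · exact Or.inr (Or.inr (Or.inl (Or.inr h')))
          · exact Or.inr (Or.inr (Or.inr (Or.inr h')))
        · rintro (h' | h' | (h' | h') | (h' | h'))
          · exact Or.inr (Or.inl h')
          · exact h'.elim
          · exact Or.inr (Or.inl (habs h'))
          · exact Or.inr (Or.inr (Or.inr (Or.inl h')))
          · exact Or.inr (Or.inr (Or.inl h'))
          · exact Or.inr (Or.inr (Or.inr (Or.inr h')))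
    · by_cases hq : i = '?'
      · subst hq
        have hcq : "aeiou".toList.contains '?' = false := by decide
        have hvq : vowQ '?' = true := by decide
        have hnv : nonV '?' = true := by decide
        have h6 : 6 - n = (5 - n) + 1 := by omega
        have h4 : 4 - m = (3 - m) + 1 := by omega
        rw [h6, h4]
        simp only [chk, hcq, Bool.false_eq_true, if_false, if_true, frontMatch_cons, hvq, hnv,
          Bool.true_and, List.tail_cons]
        by_cases h5 : n + 1 > 5
        · have h50 : 5 - n = 0 := by omega
          simp [h5, h50, frontMatch_zero]
        · by_cases h3 : m + 1 > 3
          · have h30 : 3 - m = 0 := by omega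
            simp [h3, h30, frontMatch_zero]
          · have habsV : frontMatch vowQ 6 rest = true → frontMatch vowQ (5 - n) rest = true :=
              frontMatch_mono (by omega)
            have habsC : frontMatch nonV 4 rest = true → frontMatch nonV (3 - m) rest = true :=
              frontMatch_mono (by omega)
            have h65 : 6 - (n + 1) = 5 - n := by omega
            have h43 : 4 - (m + 1) = 3 - m := by omega
            have hih := ih (n + 1) (m + 1) (by omega) (by omega)
            rw [h65, h43] at hih
            rw [searchRun_eq vowQ 6 (by omega) rest, searchRun_eq nonV 4 (by omega) rest]
            have hn5 : ¬ ((5 : Nat) < n + 1) := by omega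
            have hm3 : ¬ ((3 : Nat) < m + 1) := by omega
            simp only [Bool.or_eq_true, decide_eq_true_eq, hih, gt_iff_lt]
            constructor
            · rintro ((h' | h') | h' | h' | h' | h')
              · exact absurd h' hn5
              · exact absurd h' hm3
              · exact Or.inl h'
              · exact Or.inr (Or.inl h')
              · exact Or.inr (Or.inr (Or.inl (Or.inr h')))
              · exact Or.inr (Or.inr (Or.inr (Or.inr h')))
            · rintro (h' | h' | (h' | h') | (h' | h'))
              · exact Or.inr (Or.inl h')
              · exact Or.inr (Or.inr (Or.inl h'))
              · exact Or.inr (Or.inl (habsV h'))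
              · exact Or.inr (Or.inr (Or.inr (Or.inl h')))
              · exact Or.inr (Or.inr (Or.inl (habsC h')))
              · exact Or.inr (Or.inr (Or.inr (Or.inr h')))
      · have hv5 : ¬(i = 'a' ∨ i = 'e' ∨ i = 'i' ∨ i = 'o' ∨ i = 'u') := by simpa using hv
        have hvq : vowQ i = false := by
          simp [vowQ]
          push_neg at hv5
          exact ⟨hv5.1, hv5.2.1, hv5.2.2.1, hv5.2.2.2.1, hv5.2.2.2.2, hq⟩
        have hv' : "aeiou".toList.contains i = false := by simpa using hv
        have hnv : nonV i = true := by simp only [nonV, hv', Bool.not_false]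
        have h6 : 6 - n = (5 - n) + 1 := by omega
        have h4 : 4 - m = (3 - m) + 1 := by omega
        rw [h6, h4]
        simp only [chk, hv', Bool.false_eq_true, if_false, if_neg hq, Bool.not_false, if_true,
          frontMatch_cons, hvq, hnv, Bool.true_and, Bool.false_and, List.tail_cons]
        by_cases h3 : m + 1 > 3
        · have h30 : 3 - m = 0 := by omega
          simp [h3, h30, frontMatch_zero]
        · have habsC : frontMatch nonV 4 rest = true → frontMatch nonV (3 - m) rest = true :=
            frontMatch_mono (by omega)
          have h43 : 4 - (m + 1) = 3 - m := by omega
          have hih := ih 0 (m + 1) (by omega) (by omega)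
          rw [h43] at hih
          rw [searchRun_eq vowQ 6 (by omega) rest, searchRun_eq nonV 4 (by omega) rest]
          have hm3 : ¬ ((3 : Nat) < m + 1) := by omega
          have h05 : ¬ ((5 : Nat) < 0) := by omega
          simp only [Bool.or_eq_true, decide_eq_true_eq, hih, gt_iff_lt, Nat.sub_zero]
          constructor
          · rintro ((h' | h') | h' | h' | h' | h')
            · exact absurd h' h05
            · exact absurd h' hm3
            · exact Or.inr (Or.inr (Or.inl (Or.inl h')))
            · exact Or.inr (Or.inl h')
            · exact Or.inr (Or.inr (Or.inl (Or.inr h')))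
            · exact Or.inr (Or.inr (Or.inr (Or.inr h')))
          · rintro (h' | h' | (h' | h') | (h' | h'))
            · exact h'.elim
            · exact Or.inr (Or.inr (Or.inl h'))
            · exact Or.inr (Or.inl h')
            · exact Or.inr (Or.inr (Or.inr (Or.inl h')))
            · exact Or.inr (Or.inr (Or.inl (habsC h')))
            · exact Or.inr (Or.inr (Or.inr (Or.inr h')))

lemma chk_zero_iff (l : List Char) :
    (chk l 0 0 = true ↔ (searchRun vowQ 6 l = true ∨ searchRun nonV 4 l = true)) := by
  have h := chk_iff l 0 0 (by omega) (by omega)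
  rw [searchRun_eq vowQ 6 (by omega) l, searchRun_eq nonV 4 (by omega) l]
  simp only [Nat.sub_zero] at h
  simp only [h, Bool.or_eq_true]
  tauto

lemma searchRun_exists (p : Char → Bool) (k : Nat) (hk : 1 ≤ k) : ∀ l : List Char,
    (searchRun p k l = true ↔ ∃ i, i + k ≤ l.length ∧ ((l.drop i).take k).all p = true) := by
  intro l
  induction l with
  | nil =>
    simp [searchRun]
    omega
  | cons a rest ih =>
    simp only [searchRun, Bool.or_eq_true, ih, frontMatch, Bool.and_eq_true, decide_eq_true_eq]
    constructor
    · rintro (⟨h1, h2⟩ | ⟨i, h1, h2⟩)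
      · exact ⟨0, by simpa using h1, by simpa using h2⟩
      · exact ⟨i + 1, by simp; omega, by simpa using h2⟩
    · rintro ⟨i, h1, h2⟩
      cases i with
      | zero => exact Or.inl ⟨by simpa using h1, by simpa using h2⟩
      | succ j => exact Or.inr ⟨j, by simp at h1 ⊢; omega, by simpa using h2⟩

lemma any_range_exists (p : Char → Bool) (k d : Nat) (hk : k = d + 1) (l : List Char) :
    ((List.range (l.length - d)).any (fun i => ((l.drop i).take k).all p) = true ↔
      ∃ i, i + k ≤ l.length ∧ ((l.drop i).take k).all p = true) := by
  simp only [List.any_eq_true, List.mem_range]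
  constructor
  · rintro ⟨i, h1, h2⟩; exact ⟨i, by omega, h2⟩
  · rintro ⟨i, h1, h2⟩; exact ⟨i, by omega, h2⟩

-- ===== VERDICT (by name: the statement is the Claim_ definition above) =====
theorem isGoodorBad_spec : Claim_equal_isGoodorBad := by
  intro S _
  unfold Spec_isGoodorBad
  have hA : isGoodorBad S = (if chk S.toList 0 0 then 0 else 1) := by
    have := goA_eq_chk S.toList 0 0
    simpa [isGoodorBad] using this
  have e1 : (searchRun vowQ 6 S.toList = true) ↔
      ((List.range (S.toList.length - 5)).any
        (fun i => ((S.toList.drop i).take 6).all (fun c => "aeiou?".toList.contains c)) = true) := by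
    rw [searchRun_exists vowQ 6 (by omega) S.toList,
      any_range_exists (fun c => "aeiou?".toList.contains c) 6 5 rfl S.toList]
    exact Iff.rfl
  have e2 : (searchRun nonV 4 S.toList = true) ↔
      ((List.range (S.toList.length - 3)).any
        (fun i => ((S.toList.drop i).take 4).all (fun c => !("aeiou".toList.contains c))) = true) := by
    rw [searchRun_exists nonV 4 (by omega) S.toList,
      any_range_exists (fun c => !("aeiou".toList.contains c)) 4 3 rfl S.toList]
    exact Iff.rfl
  rw [hA]
  unfold isGoodorBad_alt
  by_cases h : chk S.toList 0 0 = true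
  · rw [if_pos h]
    rcases (chk_zero_iff S.toList).mp h with h' | h'
    · rw [if_pos (e1.mp h')]
    · by_cases h1 : searchRun vowQ 6 S.toList = true
      · rw [if_pos (e1.mp h1)]
      · rw [if_neg (fun hc => h1 (e1.mpr hc)), if_pos (e2.mp h')]
  · rw [if_neg h]
    have hnot : ¬(searchRun vowQ 6 S.toList = true ∨ searchRun nonV 4 S.toList = true) :=
      fun hc => h ((chk_zero_iff S.toList).mpr hc)
    rw [if_neg (fun hc => hnot (Or.inl (e1.mpr hc))), if_neg (fun hc => hnot (Or.inr (e2.mpr hc)))]
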